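-- pv_equiv track=rewrite | github.com/tejashripadman/codes_2 | vowels_remover.py | vowels_remover
-- ===== SOURCE A (Python) =====
-- def vowels_remover(string):
--     vowels = 'aeiou'
--     l = []
--     s = ''
--     for i in string:
--         if i not in vowels:
--             s += i
--         elif len(s)>0 and i in vowels:
--             l.append(s)
--             s = ''
--     return l
-- ===== SOURCE B (Python) =====
-- def vowels_remover(string):
--     out = []
--     start = 0
--     for i, ch in enumerate(string):
--         if ch in 'aeiou':
--             if i > start:
--                 out.append(string[start:i])
--             start = i + 1
--     return out
-- ===== Notes on version B (the rewrite author's own statement) =====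
-- stated objective: idiomatic
-- what changed: B makes one pass with enumerate and emits slices string[start:i] at each vowel (tracking the start index of the current run) instead of accumulating characters into a growing buffer that is flushed at vowels.
import Mathlib
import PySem

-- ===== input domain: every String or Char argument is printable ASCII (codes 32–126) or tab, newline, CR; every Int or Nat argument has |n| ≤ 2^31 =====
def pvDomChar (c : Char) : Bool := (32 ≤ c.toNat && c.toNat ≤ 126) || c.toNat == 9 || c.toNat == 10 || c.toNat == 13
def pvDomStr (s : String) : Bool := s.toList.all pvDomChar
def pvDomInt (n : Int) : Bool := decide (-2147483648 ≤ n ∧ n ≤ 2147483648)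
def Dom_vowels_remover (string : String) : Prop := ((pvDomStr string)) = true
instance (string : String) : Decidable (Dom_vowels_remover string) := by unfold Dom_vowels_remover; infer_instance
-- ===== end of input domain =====

-- B replaces A's character-accumulating buffer with an enumerate/start-index scan emitting slices; objective: idiomatic, same O(n) cost.

-- ===== PORT A =====
-- A's loop body: accumulate consonants into s; at a vowel, if s nonempty, append it (as a string) and reset.
def pvStepA : List String × List Char → Char → List String × List Char := fun st i =>
  if i ∉ ("aeiou".toList) then (st.1, st.2 ++ [i])
  else if st.2.length > 0 ∧ i ∈ ("aeiou".toList) then (st.1 ++ [String.ofList st.2], [])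
  else st

def vowels_remover (string : String) : List String :=
  (string.toList.foldl pvStepA ([], [])).1

-- ===== PORT B =====
-- B's loop body: for (i, ch) in enumerate(string): at a vowel, if i > start emit string[start:i]; start = i+1.
def pvStepB (cs : List Char) : List String × Int → Int × Char → List String × Int := fun st p =>
  if p.2 ∈ ("aeiou".toList) then
    (if p.1 > st.2 then st.1 ++ [String.ofList (PySem.List.slice cs (some st.2) (some p.1))] else st.1,
     p.1 + 1)
  else st

def vowels_remover_alt (string : String) : List String :=
  ((PySem.List.enumerate string.toList 0).foldl (pvStepB string.toList) ([], 0)).1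

-- ===== PRECONDITION & SPEC =====
def Spec_vowels_remover (string : String) (out : List String) : Prop := out = vowels_remover_alt string
instance (string : String) (out : List String) : Decidable (Spec_vowels_remover string out) := by unfold Spec_vowels_remover; infer_instance

-- ===== CLAIM (what is proved, stated in full; the proofs are below) =====
def Claim_equal_vowels_remover : Prop := ∀ (string : String), Dom_vowels_remover string → Spec_vowels_remover string (vowels_remover string)

-- ===== LEMMAS AND PROOFS =====

theorem pvStepA_cons (st : List String × List Char) (i : Char) (h : i ∉ ("aeiou".toList)) :
    pvStepA st i = (st.1, st.2 ++ [i]) := by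
  unfold pvStepA; rw [if_pos h]

theorem pvStepA_vowel_pos (st : List String × List Char) (i : Char) (hv : i ∈ ("aeiou".toList))
    (hl : st.2.length > 0) : pvStepA st i = (st.1 ++ [String.ofList st.2], []) := by
  unfold pvStepA; rw [if_neg (not_not_intro hv), if_pos ⟨hl, hv⟩]

theorem pvStepA_vowel_nil (st : List String × List Char) (i : Char) (hv : i ∈ ("aeiou".toList))
    (hl : st.2 = []) : pvStepA st i = st := by
  unfold pvStepA
  rw [if_neg (not_not_intro hv), if_neg (by rw [hl]; simp)]

theorem pvStepB_cons (cs : List Char) (st : List String × Int) (p : Int × Char)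
    (h : p.2 ∉ ("aeiou".toList)) : pvStepB cs st p = st := by
  unfold pvStepB; rw [if_neg h]

theorem pvStepB_vowel_pos (cs : List Char) (st : List String × Int) (p : Int × Char)
    (hv : p.2 ∈ ("aeiou".toList)) (hl : p.1 > st.2) :
    pvStepB cs st p = (st.1 ++ [String.ofList (PySem.List.slice cs (some st.2) (some p.1))], p.1 + 1) := by
  unfold pvStepB; rw [if_pos hv, if_pos hl]

theorem pvStepB_vowel_eq (cs : List Char) (st : List String × Int) (p : Int × Char)
    (hv : p.2 ∈ ("aeiou".toList)) (hl : ¬ (p.1 > st.2)) :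
    pvStepB cs st p = (st.1, p.1 + 1) := by
  unfold pvStepB; rw [if_pos hv, if_neg hl]

theorem vowels_remover_main (cs : List Char) :
    ∀ (rest : List Char) (k start : Nat) (out : List String),
      cs.drop k = rest → start ≤ k →
      ((PySem.List.enumerate rest (k : Int)).foldl (pvStepB cs) (out, (start : Int))).1
      = (rest.foldl pvStepA (out, (cs.drop start).take (k - start))).1 := by
  intro rest
  induction rest with
  | nil => intro k start out _ _; simp [PySem.List.enumerate]
  | cons c rest' ih =>
    intro k start out hdrop hle
    have hklen : k < cs.length := by
      by_contra h
      have : cs.drop k = [] := List.drop_eq_nil_of_le (by omega)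
      rw [this] at hdrop; exact absurd hdrop (by simp)
    have hdrop' : cs.drop (k + 1) = rest' := by
      have := congrArg List.tail hdrop
      simpa [List.tail_drop] using this
    have hck : cs[k]? = some c := by
      have : (cs.drop k)[0]? = some c := by rw [hdrop]; simp
      simpa using this
    have hslen : ((cs.drop start).take (k - start)).length = k - start := by
      simp [List.length_take, List.length_drop]; omega
    have hcast : (k : Int) + 1 = ((k + 1 : Nat) : Int) := by push_cast; ring
    rw [PySem.List.enumerate_cons, List.foldl_cons, List.foldl_cons]
    by_cases hv : c ∈ ("aeiou".toList)
    · by_cases hlt : start < k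
      · have hgt : ((k : Int), c).1 > ((out, (start : Int)) : List String × Int).2 := by
          show ((start : Nat) : Int) < ((k : Nat) : Int)
          exact_mod_cast hlt
        rw [pvStepB_vowel_pos cs _ _ hv hgt,
            pvStepA_vowel_pos _ _ hv (by simpa [hslen] using (by omega : 0 < k - start))]
        have hslice : PySem.List.slice cs (some (start : Int)) (some (k : Int))
            = (cs.drop start).take (k - start) := by
          simpa using PySem.List.slice_natCast cs start k
        rw [hslice, hcast]
        have := ih (k + 1) (k + 1) (out ++ [String.ofList ((cs.drop start).take (k - start))]) hdrop' (le_refl _)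
        simpa using this
      · have hsk : start = k := by omega
        have hngt : ¬ (((k : Int), c).1 > ((out, (start : Int)) : List String × Int).2) := by
          simp [hsk]
        have hs0 : (cs.drop start).take (k - start) = [] := by simp [hsk]
        rw [pvStepB_vowel_eq cs _ _ hv hngt, pvStepA_vowel_nil _ _ hv (by simpa using hs0), hs0, hcast]
        have := ih (k + 1) (k + 1) out hdrop' (le_refl _)
        simpa using this
    · rw [pvStepB_cons cs _ _ hv, pvStepA_cons _ _ hv]
      have hnext : (cs.drop start).take (k + 1 - start) = (cs.drop start).take (k - start) ++ [c] := by
        have h1 : k + 1 - start = (k - start) + 1 := by omega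
        rw [h1, List.take_add_one]
        have : (cs.drop start)[k - start]? = some c := by
          rw [List.getElem?_drop]
          have : start + (k - start) = k := by omega
          rw [this, hck]
        simp [this]
      rw [hcast]
      have := ih (k + 1) start out hdrop' (by omega)
      rw [hnext] at this
      simpa using this

-- ===== VERDICT (by name: the statement is the Claim_ definition above) =====
theorem vowels_remover_spec : Claim_equal_vowels_remover := by
  intro string _
  unfold Spec_vowels_remover vowels_remover vowels_remover_alt
  have := vowels_remover_main string.toList string.toList 0 0 [] (by simp) (le_refl _)
  simpa using this.symm
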